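-- pv_equiv track=rewrite | github.com/svend/home-bin | multi_x509.py | certs
-- ===== SOURCE A (Python) =====
-- def certs(iterator):
--     '''Yield certificates from iterator.'''
--     BEGIN = '-----BEGIN'
--     END = '-----END'
--
--     it = iter(iterator)
--     cert_lines = []
--     for line in it:
--         if line.startswith(BEGIN) or cert_lines:
--             cert_lines.append(line)
--             if line.startswith(END):
--                 yield ''.join(cert_lines)
--                 cert_lines = []
-- ===== SOURCE B (Python) =====
-- def certs(iterator):
--     '''Yield certificates from iterator.'''
--     BEGIN = '-----BEGIN'
--     END = '-----END'
--
--     it = iter(iterator)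
--     for line in it:
--         if line.startswith(BEGIN):
--             cert_lines = [line]
--             for line in it:
--                 cert_lines.append(line)
--                 if line.startswith(END):
--                     yield ''.join(cert_lines)
--                     break
-- ===== Notes on version B (the rewrite author's own statement) =====
-- stated objective: alternative
-- what changed: Replaced the single loop with a truthiness flag ('startswith(BEGIN) or cert_lines') by a nested-loop state machine over a shared iterator: an outer loop skips until a BEGIN line, an inner loop consumes and accumulates until an END line, yields the joined block and breaks back to the outer loop.
import Mathlib
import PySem

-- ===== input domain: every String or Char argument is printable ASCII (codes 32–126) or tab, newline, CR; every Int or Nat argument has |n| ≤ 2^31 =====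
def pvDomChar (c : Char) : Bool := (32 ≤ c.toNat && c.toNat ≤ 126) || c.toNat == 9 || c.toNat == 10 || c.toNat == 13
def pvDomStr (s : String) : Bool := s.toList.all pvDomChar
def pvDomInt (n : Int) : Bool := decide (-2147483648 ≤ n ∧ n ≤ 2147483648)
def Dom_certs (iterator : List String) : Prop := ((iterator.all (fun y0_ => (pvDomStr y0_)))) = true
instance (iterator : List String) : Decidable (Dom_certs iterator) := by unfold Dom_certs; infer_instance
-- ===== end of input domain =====

-- B replaces A's single loop with a truthiness flag by a nested-loop state machine
-- (outer: skip until BEGIN; inner: accumulate until END); alternative decomposition, no speed claim.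

-- ===== PORT A =====
-- A's single for-loop over `it` with accumulator `cert_lines`, branch order as in Python.
def certsA_loop (cert_lines : List String) : List String → List String
  | [] => []
  | line :: rest =>
    if PySem.Str.startswith line "-----BEGIN" || !cert_lines.isEmpty then
      let cl := cert_lines ++ [line]
      if PySem.Str.startswith line "-----END" then
        PySem.Str.join "" cl :: certsA_loop [] rest
      else
        certsA_loop cl rest
    else
      certsA_loop cert_lines rest

def certs (iterator : List String) : List String := certsA_loop [] iterator

-- ===== PORT B =====
-- B's two loops over the shared iterator: outer skips to a BEGIN line, inner consumes to an END line.
mutual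
def certsB_outer : List String → List String
  | [] => []
  | line :: rest =>
    if PySem.Str.startswith line "-----BEGIN" then
      certsB_inner [line] rest
    else
      certsB_outer rest

def certsB_inner (cert_lines : List String) : List String → List String
  | [] => []
  | line :: rest =>
    let cl := cert_lines ++ [line]
    if PySem.Str.startswith line "-----END" then
      PySem.Str.join "" cl :: certsB_outer rest
    else
      certsB_inner cl rest
end

def certs_alt (iterator : List String) : List String := certsB_outer iterator

-- ===== PRECONDITION & SPEC =====
def Spec_certs (iterator : List String) (out : List String) : Prop := out = certs_alt iterator
instance (iterator : List String) (out : List String) : Decidable (Spec_certs iterator out) := by unfold Spec_certs; infer_instance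

-- ===== CLAIM (what is proved, stated in full; the proofs are below) =====
def Claim_equal_certs : Prop := ∀ (iterator : List String), Dom_certs iterator → Spec_certs iterator (certs iterator)

-- ===== LEMMAS AND PROOFS =====

-- A line starting with '-----BEGIN' cannot also start with '-----END'.
theorem begin_not_end (s : String) (h : PySem.Str.startswith s "-----BEGIN" = true) :
    PySem.Str.startswith s "-----END" = false := by
  by_contra hc
  rw [Bool.not_eq_false] at hc
  rw [PySem.Str.startswith_eq, PySem.Chars.startswith_iff] at h hc
  rcases List.prefix_or_prefix_of_prefix hc h with h1 | h1
  · revert h1; decide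
  · revert h1; decide

theorem loop_eq (xs : List String) : ∀ cl : List String,
    certsA_loop cl xs = if cl.isEmpty then certsB_outer xs else certsB_inner cl xs := by
  induction xs with
  | nil => intro cl; cases cl <;> simp [certsA_loop, certsB_outer, certsB_inner]
  | cons line rest ih =>
    intro cl
    cases cl with
    | nil =>
      simp only [certsA_loop, certsB_outer, List.isEmpty_nil, Bool.not_true, Bool.or_false]
      split_ifs with hb he
      · have hb' : PySem.Str.startswith line "-----BEGIN" = true := by simpa using hb
        have h2 := begin_not_end line hb'
        simp at h2
        simp [h2] at he
      · simpa using ih [line]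
      · simpa using ih []
    | cons c cs =>
      by_cases he : PySem.Str.startswith line "-----END" = true
      · have he' := he
        simp at he'
        simp [certsA_loop, certsB_inner, he', ih []]
      · have he' : PySem.Str.startswith line "-----END" = false := by
          simpa using he
        simp at he'
        simp [certsA_loop, certsB_inner, he', ih (c :: (cs ++ [line]))]

-- ===== VERDICT (by name: the statement is the Claim_ definition above) =====
theorem certs_spec : Claim_equal_certs := by
  intro it _
  unfold Spec_certs certs certs_alt
  simpa using loop_eq it []
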